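-- pv_equiv track=rewrite | github.com/sakuralggm/algorithm_training | bytedance/最佳人选.py | solution
-- ===== SOURCE A (Python) =====
-- def solution(m, n, target, array):
--     min_diff = float("inf")
--     min_person = 'None'
--     for i in range(0, len(array)):
--         diff = 0
--         for j in range(m):
--             # 如果一个是A，一个是E，则diff为无穷大，BD\CE\BE也是一样的，只有这些情况是无穷大
--             comb = array[i][j] + target[j]
--             if comb == 'AE' or comb == 'BD' or comb == 'CE' or comb == 'BE' or comb == 'EC' or comb == 'DB' or comb == 'EA' or comb == 'EB':
--                 diff = float("inf")
--                 break
--             else: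
--                 diff += abs(ord(array[i][j]) - ord(target[j]))
--         if diff < min_diff:
--             min_diff = diff
--             min_person = "".join(array[i])
--         elif diff == min_diff:
--             min_person = min_person + " " + "".join(array[i])
--     if min_diff < float("inf"):
--         return min_person
--     else:
--         return "None"
-- ===== SOURCE B (Python) =====
-- def solution(m, n, target, array):
--     FORBIDDEN = {'AE', 'BD', 'CE', 'BE', 'EC', 'DB', 'EA', 'EB'}
--
--     def diff(p):
--         # None stands for an infinite (incompatible) difference
--         if any(p[j] + target[j] in FORBIDDEN for j in range(m)):
--             return None
--         return sum(abs(ord(p[j]) - ord(target[j])) for j in range(m))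
--
--     scored = [(''.join(p), diff(p)) for p in array]
--     finite = [d for _, d in scored if d is not None]
--     if not finite:
--         return 'None'
--     best = min(finite)
--     return ' '.join(s for s, d in scored if d == best)
-- ===== Notes on version B (the rewrite author's own statement) =====
-- stated objective: simpler
-- what changed: A fuses everything into one loop that maintains a running minimum and a hand-concatenated result string; B maps each person to a (joined-name, diff) pair, takes min() of the finite diffs, and joins a comprehension of the minimizers.
-- outside the precondition, e.g. on solution(2, 1, ['E', 'E'], [['A', 'XY']]): A returns 'None', B returns 'None'
import Mathlib
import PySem

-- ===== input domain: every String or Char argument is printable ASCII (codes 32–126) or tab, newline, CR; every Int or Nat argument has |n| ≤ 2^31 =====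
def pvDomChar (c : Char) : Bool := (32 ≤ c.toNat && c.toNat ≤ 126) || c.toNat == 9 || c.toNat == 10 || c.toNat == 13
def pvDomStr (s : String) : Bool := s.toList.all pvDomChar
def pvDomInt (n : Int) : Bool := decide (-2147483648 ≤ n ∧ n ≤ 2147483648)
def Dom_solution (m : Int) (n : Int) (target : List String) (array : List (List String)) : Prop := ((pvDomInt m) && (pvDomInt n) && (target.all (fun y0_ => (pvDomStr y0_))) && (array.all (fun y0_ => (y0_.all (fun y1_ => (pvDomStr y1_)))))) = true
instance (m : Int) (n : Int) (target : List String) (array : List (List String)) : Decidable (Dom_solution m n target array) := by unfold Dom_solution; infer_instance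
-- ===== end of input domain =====

-- B replaces A's fused running-minimum/string-concatenation loop by a map to (name, diff)
-- pairs, min() over the finite diffs and a join of the minimizers (objective: simpler).

-- ===== PORT A =====
-- ord(s) for the single-character strings Pre_ admits
def pvOrd (s : String) : Int := ((s.toList.headD 'A').toNat : Int)

-- A's chained comparison 'comb == "AE" or comb == "BD" or ...'
def pvIsForbA (c : String) : Bool :=
  c == "AE" || c == "BD" || c == "CE" || c == "BE" || c == "EC" || c == "DB" || c == "EA" || c == "EB"

-- A's inner 'for j in range(m)' with the break (none = float("inf"))
def pvDiffLoopA (tgt row : List String) : List Int → Int → Option Int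
  | [], acc => some acc
  | j :: js, acc =>
    if pvIsForbA (PySem.List.pyGetD row j "" ++ PySem.List.pyGetD tgt j "") then none
    else pvDiffLoopA tgt row js
      (acc + |pvOrd (PySem.List.pyGetD row j "") - pvOrd (PySem.List.pyGetD tgt j "")|)

-- one iteration of A's outer loop: state = (min_diff, min_person), none = float("inf")
def pvStepA (m : Int) (tgt : List String) (st : Option Int × String) (row : List String) :
    Option Int × String :=
  match pvDiffLoopA tgt row (PySem.List.pyRange 0 m 1) 0, st with
  | some d, (some mv, mp) =>
      if d < mv then (some d, PySem.Str.join "" row)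
      else if d = mv then (some mv, mp ++ " " ++ PySem.Str.join "" row)
      else (some mv, mp)
  | some d, (none, _) => (some d, PySem.Str.join "" row)          -- d < inf
  | none, (some mv, mp) => (some mv, mp)                           -- inf < mv and inf == mv both false
  | none, (none, mp) => (none, mp ++ " " ++ PySem.Str.join "" row) -- inf == inf: the elif fires

def solution (m : Int) (n : Int) (target : List String) (array : List (List String)) : String :=
  let st := array.foldl (pvStepA m target) (none, "None")
  match st.1 with
  | some _ => st.2
  | none => "None"

-- ===== PORT B =====
def pvForbB : PySem.Set String := PySem.Set.ofList ["AE", "BD", "CE", "BE", "EC", "DB", "EA", "EB"]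

-- B's diff(p): any(...) over range(m), else sum(...) over range(m)
def pvDiffB (m : Int) (tgt : List String) (p : List String) : Option Int :=
  let js := PySem.List.pyRange 0 m 1
  if js.any (fun j => PySem.Set.contains pvForbB (PySem.List.pyGetD p j "" ++ PySem.List.pyGetD tgt j "")) then
    none
  else
    some ((js.map (fun j => |pvOrd (PySem.List.pyGetD p j "") - pvOrd (PySem.List.pyGetD tgt j "")|)).sum)

def solution_alt (m : Int) (n : Int) (target : List String) (array : List (List String)) : String :=
  let scored := array.map (fun p => (PySem.Str.join "" p, pvDiffB m target p))
  let finite := scored.filterMap (fun x => x.2)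
  match PySem.List.min? finite (fun d => d) with
  | none => "None"
  | some best => PySem.Str.join " " ((scored.filter (fun x => x.2 == some best)).map (fun x => x.1))

-- ===== PRECONDITION & SPEC =====
-- Pre_ excludes inputs where some row of array, or target, lacks m single-character entries:
-- there A raises (IndexError, or TypeError from ord), except in the corner where an earlier
-- forbidden pair breaks the scan before the bad entry is touched (then A still returns;
-- see the cite in claim.json — B returns the same value on such inputs).
def Pre_solution (m : Int) (n : Int) (target : List String) (array : List (List String)) : Prop :=
  ∀ row ∈ array, m ≤ (row.length : Int) ∧ m ≤ (target.length : Int) ∧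
    (∀ s ∈ row.take m.toNat, s.toList.length = 1) ∧ (∀ s ∈ target.take m.toNat, s.toList.length = 1)
instance (m : Int) (n : Int) (target : List String) (array : List (List String)) : Decidable (Pre_solution m n target array) := by unfold Pre_solution; infer_instance

def pvWitness_solution : Int × Int × List String × List (List String) :=
  (2, 1, ["A", "B"], [["B", "C"], ["A", "B"]])

def Spec_solution (m : Int) (n : Int) (target : List String) (array : List (List String)) (out : String) : Prop := out = solution_alt m n target array
instance (m : Int) (n : Int) (target : List String) (array : List (List String)) (out : String) : Decidable (Spec_solution m n target array out) := by unfold Spec_solution; infer_instance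

-- ===== CLAIM (what is proved, stated in full; the proofs are below) =====
def Claim_equal_solution : Prop := ∀ (m : Int) (n : Int) (target : List String) (array : List (List String)), Dom_solution m n target array → Pre_solution m n target array → Spec_solution m n target array (solution m n target array)

-- ===== LEMMAS AND PROOFS =====

-- the per-row difference both ports compute
def pvD (m : Int) (tgt : List String) (p : List String) : Option Int :=
  pvDiffLoopA tgt p (PySem.List.pyRange 0 m 1) 0

theorem pvBeqDec (a b : String) : (a == b) = decide (a = b) := by
  by_cases h : a = b <;> simp [h]

theorem pvContains_forb (c : String) : PySem.Set.contains pvForbB c = pvIsForbA c := by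
  have h : pvForbB = ["AE", "BD", "CE", "BE", "EC", "DB", "EA", "EB"] := by decide
  rw [h]
  simp only [PySem.Set.contains]
  simp [pvIsForbA, Bool.or_assoc, pvBeqDec]

theorem pvDiffLoopA_eq (tgt row : List String) (js : List Int) (acc : Int) :
    pvDiffLoopA tgt row js acc =
      if js.any (fun j => pvIsForbA (PySem.List.pyGetD row j "" ++ PySem.List.pyGetD tgt j "")) then none
      else some (acc + (js.map (fun j => |pvOrd (PySem.List.pyGetD row j "") - pvOrd (PySem.List.pyGetD tgt j "")|)).sum) := by
  induction js generalizing acc with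
  | nil => simp [pvDiffLoopA]
  | cons j t ih =>
    by_cases hf : pvIsForbA (PySem.List.pyGetD row j "" ++ PySem.List.pyGetD tgt j "") = true
    · simp [pvDiffLoopA, hf]
    · simp only [pvDiffLoopA, Bool.not_eq_true] at hf ⊢
      rw [hf, ih]
      simp [hf, add_assoc]

theorem pvDiffB_eq_pvD (m : Int) (tgt p : List String) : pvDiffB m tgt p = pvD m tgt p := by
  rw [pvD, pvDiffLoopA_eq, pvDiffB]
  simp only [pvContains_forb, zero_add]

theorem pvStr_ext {a b : String} (h : a.toList = b.toList) : a = b := String.toList_inj.mp h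

theorem pvCharsJoin_snoc (sep : List Char) (l : List (List Char)) (s : List Char) (h : l ≠ []) :
    PySem.Chars.join sep (l ++ [s]) = PySem.Chars.join sep l ++ sep ++ s := by
  induction l with
  | nil => simp at h
  | cons a t ih =>
    cases t with
    | nil => simp [PySem.Chars.join_singleton, PySem.Chars.join_cons_cons]
    | cons b u =>
      rw [show a :: (b :: u) ++ [s] = a :: (b :: (u ++ [s])) by simp,
        PySem.Chars.join_cons_cons, show b :: (u ++ [s]) = (b :: u) ++ [s] by simp,
        ih (by simp), PySem.Chars.join_cons_cons]
      simp [List.append_assoc]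

theorem pvCharsJoin_nil_snoc (l : List (List Char)) (s : List Char) :
    PySem.Chars.join [] (l ++ [s]) = PySem.Chars.join [] l ++ s := by
  cases l with
  | nil => simp [PySem.Chars.join_singleton, PySem.Chars.join_nil]
  | cons a t => simpa using pvCharsJoin_snoc [] (a :: t) s (by simp)

theorem pvJoin_singleton (s : String) : PySem.Str.join " " [s] = s := by
  apply pvStr_ext
  simp [PySem.Str.toList_join, PySem.Chars.join_singleton]

theorem pvJoin_space_snoc (l : List String) (s : String) (h : l ≠ []) :
    PySem.Str.join " " (l ++ [s]) = PySem.Str.join " " l ++ " " ++ s := by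
  apply pvStr_ext
  simp only [PySem.Str.toList_join, String.toList_append, List.map_append, List.map_cons, List.map_nil]
  rw [pvCharsJoin_snoc _ _ _ (by simpa using h)]

theorem pvJoin_empty_snoc (l : List String) (s : String) :
    PySem.Str.join "" (l ++ [s]) = PySem.Str.join "" l ++ s := by
  apply pvStr_ext
  simp only [PySem.Str.toList_join, String.toList_append, List.map_append, List.map_cons, List.map_nil]
  rw [show ("".toList : List Char) = [] from rfl, pvCharsJoin_nil_snoc]

theorem pvMin_snoc (l : List Int) (v : Int) :
    PySem.List.min? (l ++ [v]) (fun d => d) =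
      some (match PySem.List.min? l (fun d => d) with | none => v | some b => min b v) := by
  cases l with
  | nil =>
    rw [show PySem.List.min? ([] : List Int) (fun d => d) = none from
      Iff.mpr (PySem.List.min?_eq_none_iff _ _) rfl]
    simp [PySem.List.min?_id_cons]
  | cons a t =>
    rw [List.cons_append, PySem.List.min?_id_cons, PySem.List.min?_id_cons, List.foldl_append]
    simp

-- the exact state of A's outer loop after processing xs (second component only
-- meaningful for the final answer when the first is `some`)
def pvSpecState (m : Int) (tgt : List String) (xs : List (List String)) : Option Int × String :=
  match PySem.List.min? (xs.filterMap (pvD m tgt)) (fun d => d) with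
  | none => (none, "None" ++ PySem.Str.join "" (xs.map (fun p => " " ++ PySem.Str.join "" p)))
  | some b => (some b, PySem.Str.join " " ((xs.filter (fun p => pvD m tgt p == some b)).map (fun p => PySem.Str.join "" p)))

theorem pvSpecState_none (m : Int) (tgt : List String) (xs : List (List String))
    (h : PySem.List.min? (xs.filterMap (pvD m tgt)) (fun d => d) = none) :
    pvSpecState m tgt xs =
      (none, "None" ++ PySem.Str.join "" (xs.map (fun p => " " ++ PySem.Str.join "" p))) := by
  rw [pvSpecState, h]

theorem pvSpecState_some (m : Int) (tgt : List String) (xs : List (List String)) (b : Int)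
    (h : PySem.List.min? (xs.filterMap (pvD m tgt)) (fun d => d) = some b) :
    pvSpecState m tgt xs =
      (some b, PySem.Str.join " " ((xs.filter (fun p => pvD m tgt p == some b)).map (fun p => PySem.Str.join "" p))) := by
  rw [pvSpecState, h]

-- pvStepA, one equation per (diff, state) shape
theorem pvStepA_ss (m : Int) (tgt : List String) (row : List String) (d mv : Int) (mp : String)
    (h : pvD m tgt row = some d) :
    pvStepA m tgt (some mv, mp) row =
      if d < mv then (some d, PySem.Str.join "" row)
      else if d = mv then (some mv, mp ++ " " ++ PySem.Str.join "" row)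
      else (some mv, mp) := by
  unfold pvStepA
  rw [show pvDiffLoopA tgt row (PySem.List.pyRange 0 m 1) 0 = some d from h]

theorem pvStepA_sn (m : Int) (tgt : List String) (row : List String) (d : Int) (mp : String)
    (h : pvD m tgt row = some d) :
    pvStepA m tgt (none, mp) row = (some d, PySem.Str.join "" row) := by
  unfold pvStepA
  rw [show pvDiffLoopA tgt row (PySem.List.pyRange 0 m 1) 0 = some d from h]

theorem pvStepA_ns (m : Int) (tgt : List String) (row : List String) (mv : Int) (mp : String)
    (h : pvD m tgt row = none) :
    pvStepA m tgt (some mv, mp) row = (some mv, mp) := by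
  unfold pvStepA
  rw [show pvDiffLoopA tgt row (PySem.List.pyRange 0 m 1) 0 = none from h]

theorem pvStepA_nn (m : Int) (tgt : List String) (row : List String) (mp : String)
    (h : pvD m tgt row = none) :
    pvStepA m tgt (none, mp) row = (none, mp ++ " " ++ PySem.Str.join "" row) := by
  unfold pvStepA
  rw [show pvDiffLoopA tgt row (PySem.List.pyRange 0 m 1) 0 = none from h]

theorem pvFoldA (m : Int) (tgt : List String) (xs : List (List String)) :
    xs.foldl (pvStepA m tgt) (none, "None") = pvSpecState m tgt xs := by
  induction xs using List.reverseRecOn with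
  | nil =>
    rw [List.foldl_nil,
      pvSpecState_none m tgt [] (Iff.mpr (PySem.List.min?_eq_none_iff _ _) rfl)]
    refine Prod.ext rfl ?_
    apply pvStr_ext
    simp [PySem.Str.toList_join]
  | append_singleton xs x ih =>
    rw [List.foldl_append, List.foldl_cons, List.foldl_nil, ih]
    rcases hmin : PySem.List.min? (xs.filterMap (pvD m tgt)) (fun d => d) with _ | b
    · -- no finite diff among xs
      have hall : ∀ p ∈ xs, pvD m tgt p = none :=
        List.filterMap_eq_nil_iff.mp (Iff.mp (PySem.List.min?_eq_none_iff _ _) hmin)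
      have hnil : xs.filterMap (pvD m tgt) = [] := Iff.mp (PySem.List.min?_eq_none_iff _ _) hmin
      rw [pvSpecState_none m tgt xs hmin]
      rcases hD : pvD m tgt x with _ | dv
      · -- still no finite diff
        rw [pvStepA_nn m tgt x _ hD,
          pvSpecState_none m tgt (xs ++ [x]) (by
            rw [List.filterMap_append, hnil]
            simp only [List.nil_append, List.filterMap_cons, hD, List.filterMap_nil]
            exact Iff.mpr (PySem.List.min?_eq_none_iff _ _) rfl)]
        refine Prod.ext rfl ?_
        rw [List.map_append, List.map_cons, List.map_nil, pvJoin_empty_snoc]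
        apply pvStr_ext
        simp
      · -- x provides the first finite diff
        rw [pvStepA_sn m tgt x dv _ hD,
          pvSpecState_some m tgt (xs ++ [x]) dv (by
            rw [List.filterMap_append, hnil]
            simp only [List.nil_append, List.filterMap_cons, hD, List.filterMap_nil]
            rw [PySem.List.min?_id_cons]
            rfl)]
        rw [show (xs ++ [x]).filter (fun p => pvD m tgt p == some dv) = [x] by
          rw [List.filter_append]
          rw [List.filter_eq_nil_iff.mpr (fun p hp => by simp [hall p hp])]
          simp [hD]]
        rw [List.map_cons, List.map_nil, pvJoin_singleton]
    · -- running minimum is b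
      have hbmem : b ∈ xs.filterMap (pvD m tgt) := PySem.List.min?_mem hmin
      have hlb : ∀ v ∈ xs.filterMap (pvD m tgt), b ≤ v := by
        intro v hv; exact PySem.List.min?_isMin hmin v hv
      have hfilne : xs.filter (fun p => pvD m tgt p == some b) ≠ [] := by
        rcases List.mem_filterMap.mp hbmem with ⟨p, hp, hDp⟩
        intro hnil
        have := List.filter_eq_nil_iff.mp hnil p hp
        simp [hDp] at this
      rw [pvSpecState_some m tgt xs b hmin]
      rcases hD : pvD m tgt x with _ | dv
      · -- x incompatible: nothing changes
        rw [pvStepA_ns m tgt x b _ hD,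
          pvSpecState_some m tgt (xs ++ [x]) b (by
            rw [show (xs ++ [x]).filterMap (pvD m tgt) = xs.filterMap (pvD m tgt) by
              simp [List.filterMap_append, hD]]
            exact hmin)]
        rw [show (xs ++ [x]).filter (fun p => pvD m tgt p == some b) =
            xs.filter (fun p => pvD m tgt p == some b) by
          rw [List.filter_append]; simp [hD]]
      · have hmin' : PySem.List.min? ((xs ++ [x]).filterMap (pvD m tgt)) (fun d => d)
            = some (min b dv) := by
          rw [show (xs ++ [x]).filterMap (pvD m tgt) = xs.filterMap (pvD m tgt) ++ [dv] by
            simp [List.filterMap_append, hD]]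
          rw [pvMin_snoc, hmin]
        rw [pvStepA_ss m tgt x dv b _ hD]
        rcases lt_trichotomy dv b with hlt | heq | hgt
        · -- strictly better: reset
          rw [if_pos hlt,
            pvSpecState_some m tgt (xs ++ [x]) dv (by rw [hmin']; congr 1; omega)]
          rw [show (xs ++ [x]).filter (fun p => pvD m tgt p == some dv) = [x] by
            rw [List.filter_append]
            rw [List.filter_eq_nil_iff.mpr (fun p hp => by
              rcases h : pvD m tgt p with _ | v
              · simp
              · have : b ≤ v := hlb v (List.mem_filterMap.mpr ⟨p, hp, h⟩)
                simp
                omega)]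
            simp [hD]]
          rw [List.map_cons, List.map_nil, pvJoin_singleton]
        · -- tie: append
          subst heq
          rw [if_neg (by omega), if_pos rfl,
            pvSpecState_some m tgt (xs ++ [x]) dv (by rw [hmin']; congr 1; omega)]
          rw [show (xs ++ [x]).filter (fun p => pvD m tgt p == some dv) =
              xs.filter (fun p => pvD m tgt p == some dv) ++ [x] by
            rw [List.filter_append]; simp [hD]]
          rw [List.map_append, List.map_cons, List.map_nil,
            pvJoin_space_snoc _ _ (by simpa using hfilne)]
        · -- worse: ignore
          rw [if_neg (by omega), if_neg (by omega),
            pvSpecState_some m tgt (xs ++ [x]) b (by rw [hmin']; congr 1; omega)]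
          rw [show (xs ++ [x]).filter (fun p => pvD m tgt p == some b) =
              xs.filter (fun p => pvD m tgt p == some b) by
            rw [List.filter_append]; simp [hD]; omega]

-- ===== VERDICT (by name: the statement is the Claim_ definition above) =====
theorem solution_spec : Claim_equal_solution := by
  intro m n tgt arr _hdom _hpre
  unfold Spec_solution
  simp only [solution, solution_alt]
  rw [pvFoldA]
  rw [show List.filterMap (fun x => x.2)
        (List.map (fun p => (PySem.Str.join "" p, pvDiffB m tgt p)) arr)
      = arr.filterMap (pvD m tgt) by
    rw [List.filterMap_map]
    exact List.filterMap_congr (fun p _ => pvDiffB_eq_pvD m tgt p)]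
  rcases hmin : PySem.List.min? (arr.filterMap (pvD m tgt)) (fun d => d) with _ | b
  · rw [pvSpecState_none m tgt arr hmin]
  · rw [pvSpecState_some m tgt arr b hmin]
    simp only [List.filter_map, List.map_map, Function.comp_def, pvDiffB_eq_pvD]
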